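-- pv_equiv track=rewrite | github.com/AdamZhouSE/pythonHomework | Code/CodeRecords/2639/60627/239242.py | f
-- ===== SOURCE A (Python) =====
-- def f(s,c):
--     t = 0
--     l = []
--     for i in range(len(s)):
--         if s[i] == c:
--             t += 1
--             l.append(t)
--         else:
--             t = 0
--     return max(l)
-- ===== SOURCE B (Python) =====
-- def f(s, c):
--     runs = []
--     i, n = 0, len(s)
--     while i < n:
--         j = i
--         while j < n and s[j] == s[i]:
--             j += 1
--         if s[i] == c:
--             runs.append(j - i)
--         i = j
--     return max(runs)
-- ===== Notes on version B (the rewrite author's own statement) =====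
-- stated objective: alternative
-- what changed: B decomposes s into maximal runs of equal characters and takes the max of the run lengths for runs of c, instead of A's per-character counter that appends every intermediate prefix count and maxes that list; both raise ValueError via max([]) when c never matches.
import Mathlib
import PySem

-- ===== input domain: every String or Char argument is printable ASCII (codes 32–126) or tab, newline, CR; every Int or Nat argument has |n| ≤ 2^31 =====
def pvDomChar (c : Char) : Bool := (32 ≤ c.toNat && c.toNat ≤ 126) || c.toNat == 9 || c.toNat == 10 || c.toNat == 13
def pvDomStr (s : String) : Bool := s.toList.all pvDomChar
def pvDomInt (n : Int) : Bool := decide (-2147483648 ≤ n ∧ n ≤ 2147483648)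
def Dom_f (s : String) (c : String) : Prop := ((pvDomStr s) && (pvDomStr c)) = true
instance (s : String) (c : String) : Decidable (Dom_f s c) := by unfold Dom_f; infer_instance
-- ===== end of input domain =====

-- B replaces A's per-character counter (which appends every intermediate prefix count and maxes the list)
-- with a decomposition of s into maximal runs of equal characters, maxing the lengths of the runs of c;
-- same O(n) cost (objective: alternative). Both Pythons raise ValueError when c never matches (excluded by Pre_).


-- ===== PORT A =====
-- the loop body: if s[i] == c then t += 1; l.append(t) else t = 0, over state (t, l)
def fStep (c : String) (p : Int × List Int) (ch : Char) : Int × List Int :=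
  if String.ofList [ch] == c then (p.1 + 1, p.2 ++ [p.1 + 1]) else ((0 : Int), p.2)

-- max(l) raises on the empty list (Python ValueError); Pre_f excludes that, .getD 0 is unreachable inside Pre_f
def f (s : String) (c : String) : Int :=
  let st := s.toList.foldl (fStep c) ((0 : Int), ([] : List Int))
  (PySem.List.max? st.2 (fun x => x)).getD 0

-- ===== PORT B =====
-- the outer while loop: peel one maximal run x ++ takeWhile(== x), record its length if it is a run of c
def runsB (c : String) : List Char → List Int
  | [] => []
  | x :: xs =>
    let k : Int := 1 + (xs.takeWhile (· == x)).length
    let rest := runsB c (xs.dropWhile (· == x))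
    if String.ofList [x] == c then k :: rest else rest
  termination_by l => l.length
  decreasing_by
    simpa using Nat.lt_succ_of_le (List.length_dropWhile_le _ _)

-- max(runs) raises on the empty list, exactly as in A; same .getD 0 convention
def f_alt (s : String) (c : String) : Int :=
  (PySem.List.max? (runsB c s.toList) (fun x => x)).getD 0

-- ===== PRECONDITION & SPEC =====
-- Pre_f excludes exactly the inputs where both Pythons raise ValueError (max of an empty list):
-- c never equals a character of s (in particular empty s, or c not of length 1).
def Pre_f (s : String) (c : String) : Prop :=
  (s.toList.any (fun ch => String.ofList [ch] == c)) = true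
instance (s : String) (c : String) : Decidable (Pre_f s c) := by unfold Pre_f; infer_instance

def pvWitness_f : String × String := ("abba", "b")

def Spec_f (s : String) (c : String) (out : Int) : Prop := out = f_alt s c
instance (s : String) (c : String) (out : Int) : Decidable (Spec_f s c out) := by unfold Spec_f; infer_instance

-- ===== CLAIM (what is proved, stated in full; the proofs are below) =====
def Claim_equal_f : Prop := ∀ (s : String) (c : String), Dom_f s c → Pre_f s c → Spec_f s c (f s c)

-- ===== LEMMAS AND PROOFS =====

-- [t+1, t+2, ..., t+n]: the values A appends while scanning a run of n matching characters
def intRange : Int → Nat → List Int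
  | _, 0 => []
  | a, n+1 => a :: intRange (a+1) n

-- the counter value after A's loop, by run decomposition
def tEnd (c : String) : Int → List Char → Int
  | t, [] => t
  | t, x :: xs =>
    let k : Nat := (xs.takeWhile (· == x)).length + 1
    if String.ofList [x] == c then tEnd c (t + k) (xs.dropWhile (· == x))
    else tEnd c 0 (xs.dropWhile (· == x))
  termination_by _ l => l.length
  decreasing_by
    all_goals simpa using Nat.lt_succ_of_le (List.length_dropWhile_le _ _)

-- the list A builds, by run decomposition
def seg (c : String) : Int → List Char → List Int
  | _, [] => []
  | t, x :: xs =>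
    let k : Nat := (xs.takeWhile (· == x)).length + 1
    if String.ofList [x] == c then
      intRange (t+1) k ++ seg c (t + k) (xs.dropWhile (· == x))
    else seg c 0 (xs.dropWhile (· == x))
  termination_by _ l => l.length
  decreasing_by
    all_goals simpa using Nat.lt_succ_of_le (List.length_dropWhile_le _ _)

lemma seg_nil (c : String) (t : Int) : seg c t [] = [] := by rw [seg]

lemma seg_cons_pos (c : String) (t : Int) (x : Char) (ys : List Char)
    (hx : (String.ofList [x] == c) = true) :
    seg c t (x :: ys) = intRange (t+1) ((ys.takeWhile (· == x)).length + 1)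
      ++ seg c (t + (((ys.takeWhile (· == x)).length + 1 : Nat) : Int)) (ys.dropWhile (· == x)) := by
  rw [seg]; simp [hx]

lemma seg_cons_neg (c : String) (t : Int) (x : Char) (ys : List Char)
    (hx : (String.ofList [x] == c) = false) :
    seg c t (x :: ys) = seg c 0 (ys.dropWhile (· == x)) := by
  rw [seg]; simp [hx]

lemma tEnd_cons_pos (c : String) (t : Int) (x : Char) (ys : List Char)
    (hx : (String.ofList [x] == c) = true) :
    tEnd c t (x :: ys)
      = tEnd c (t + (((ys.takeWhile (· == x)).length + 1 : Nat) : Int)) (ys.dropWhile (· == x)) := by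
  rw [tEnd]; simp [hx]

lemma tEnd_cons_neg (c : String) (t : Int) (x : Char) (ys : List Char)
    (hx : (String.ofList [x] == c) = false) :
    tEnd c t (x :: ys) = tEnd c 0 (ys.dropWhile (· == x)) := by
  rw [tEnd]; simp [hx]

lemma runsB_nil (c : String) : runsB c [] = [] := by rw [runsB]

lemma runsB_cons_pos (c : String) (x : Char) (ys : List Char)
    (hx : (String.ofList [x] == c) = true) :
    runsB c (x :: ys)
      = (1 + ((ys.takeWhile (· == x)).length : Int)) :: runsB c (ys.dropWhile (· == x)) := by
  rw [runsB]; simp [hx]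

lemma runsB_cons_neg (c : String) (x : Char) (ys : List Char)
    (hx : (String.ofList [x] == c) = false) :
    runsB c (x :: ys) = runsB c (ys.dropWhile (· == x)) := by
  rw [runsB]; simp [hx]

lemma ofList_one_inj {x y : Char} (h : String.ofList [y] = String.ofList [x]) : y = x := by
  have := congrArg String.toList h; simpa using this

lemma matchRun (c : String) : ∀ (ys : List Char) (t : Int) (l : List Int),
    (∀ y ∈ ys, (String.ofList [y] == c) = true) →
    ys.foldl (fStep c) (t, l) = (t + (ys.length : Int), l ++ intRange (t+1) ys.length) := by
  intro ys
  induction ys with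
  | nil => intro t l _; simp [intRange]
  | cons y ys ih =>
    intro t l h
    have hy : (String.ofList [y] == c) = true := h y (by simp)
    have hrec := ih (t + 1) (l ++ [t + 1]) (fun z hz => h z (by simp [hz]))
    simp only [List.foldl_cons, fStep, hy, if_pos]
    rw [hrec]
    simp only [List.length_cons, intRange, Prod.mk.injEq]
    constructor
    · push_cast; ring
    · simp

lemma nomatchRun (c : String) : ∀ (ys : List Char) (t : Int) (l : List Int),
    ys ≠ [] → (∀ y ∈ ys, (String.ofList [y] == c) = false) →
    ys.foldl (fStep c) (t, l) = (0, l) := by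
  intro ys
  induction ys with
  | nil => intro t l h _; exact absurd rfl h
  | cons y ys ih =>
    intro t l _ h
    have hy : (String.ofList [y] == c) = false := h y (by simp)
    simp only [List.foldl_cons, fStep, hy]
    rcases ys with _ | ⟨z, zs⟩
    · simp
    · exact ih 0 l (by simp) (fun w hw => h w (by simp [hw]))

lemma dropWhile_cons_prop (p : Char → Bool) : ∀ (l : List Char) {y : Char} {ys : List Char},
    l.dropWhile p = y :: ys → p y = false := by
  intro l
  induction l with
  | nil => intro y ys h; simp [List.dropWhile] at h
  | cons x xs ih =>
    intro y ys h
    by_cases hx : p x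
    · rw [List.dropWhile_cons, if_pos hx] at h; exact ih h
    · rw [List.dropWhile_cons, if_neg hx] at h
      cases h; simpa using hx

lemma fold_eq (c : String) : ∀ (n : Nat) (xs : List Char), xs.length ≤ n → ∀ (t : Int) (l : List Int),
    xs.foldl (fStep c) (t, l) = (tEnd c t xs, l ++ seg c t xs) := by
  intro n
  induction n with
  | zero =>
    intro xs hn t l
    have : xs = [] := List.length_eq_zero_iff.mp (Nat.le_zero.mp hn)
    subst this; simp [tEnd, seg_nil]
  | succ n ih =>
    intro xs hn t l
    rcases xs with _ | ⟨x, ys⟩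
    · simp [tEnd, seg_nil]
    · have hsplit : x :: ys = (x :: ys.takeWhile (· == x)) ++ ys.dropWhile (· == x) := by
        simp [List.takeWhile_append_dropWhile]
      have hdrop : (ys.dropWhile (· == x)).length ≤ n := by
        have h1 := List.length_dropWhile_le (· == x) ys
        have h2 : ys.length + 1 ≤ n + 1 := by simpa using hn
        omega
      by_cases hx : (String.ofList [x] == c) = true
      · have hall : ∀ y ∈ x :: ys.takeWhile (· == x), (String.ofList [y] == c) = true := by
          intro y hy
          rcases List.mem_cons.mp hy with h | h
          · subst h; exact hx
          · have hb : (y == x) = true := List.mem_takeWhile_imp (p := fun z => z == x) h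
            have : y = x := beq_iff_eq.mp hb
            subst this; exact hx
        conv_lhs => rw [hsplit]
        rw [List.foldl_append, matchRun c _ t l hall]
        simp only [List.length_cons]
        rw [ih _ hdrop, tEnd_cons_pos c t x ys hx, seg_cons_pos c t x ys hx, List.append_assoc]
      · have hall : ∀ y ∈ x :: ys.takeWhile (· == x), (String.ofList [y] == c) = false := by
          intro y hy
          rcases List.mem_cons.mp hy with h | h
          · subst h; simpa using hx
          · have hb : (y == x) = true := List.mem_takeWhile_imp (p := fun z => z == x) h
            have : y = x := beq_iff_eq.mp hb
            subst this; simpa using hx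
        conv_lhs => rw [hsplit]
        rw [List.foldl_append, nomatchRun c _ t l (by simp) hall]
        rw [ih _ hdrop, tEnd_cons_neg c t x ys (by simpa using hx),
            seg_cons_neg c t x ys (by simpa using hx)]

lemma foldl_max_pull : ∀ (xs : List Int) (a : Int), 0 ≤ a → (∀ x ∈ xs, 0 ≤ x) →
    xs.foldl max a = max a (xs.foldl max 0) := by
  intro xs
  induction xs with
  | nil => intro a ha _; simpa using ha
  | cons x xs ih =>
    intro a ha h
    have hx : 0 ≤ x := h x (by simp)
    have hrest : ∀ y ∈ xs, 0 ≤ y := fun y hy => h y (by simp [hy])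
    rw [List.foldl_cons, List.foldl_cons, ih (max a x) (le_trans ha (le_max_left _ _)) hrest,
        ih (max 0 x) (le_max_left _ _) hrest]
    have h0x : max (0 : Int) x = x := max_eq_right hx
    rw [h0x, max_assoc]

lemma intRange_mem : ∀ (n : Nat) (a b : Int), b ∈ intRange a n → a ≤ b := by
  intro n
  induction n with
  | zero => intro a b h; simp [intRange] at h
  | succ n ih =>
    intro a b h
    rcases List.mem_cons.mp (by simpa [intRange] using h) with h | h
    · omega
    · have := ih (a+1) b h; omega

lemma intRange_fold : ∀ (n : Nat) (a : Int), (intRange (a+1) n).foldl max a = a + n := by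
  intro n
  induction n with
  | zero => intro a; simp [intRange]
  | succ n ih =>
    intro a
    have h1 : max a (a+1) = a + 1 := by omega
    rw [intRange, List.foldl_cons, h1, ih (a+1)]
    push_cast; ring

lemma seg_pos (c : String) : ∀ (n : Nat) (xs : List Char), xs.length ≤ n → ∀ (t : Int), 0 ≤ t →
    ∀ b ∈ seg c t xs, 1 ≤ b := by
  intro n
  induction n with
  | zero =>
    intro xs hn t ht b hb
    have : xs = [] := List.length_eq_zero_iff.mp (Nat.le_zero.mp hn)
    subst this; simp [seg_nil] at hb
  | succ n ih =>
    intro xs hn t ht b hb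
    rcases xs with _ | ⟨x, ys⟩
    · simp [seg_nil] at hb
    · have hdrop : (ys.dropWhile (· == x)).length ≤ n := by
        have h1 := List.length_dropWhile_le (· == x) ys
        have h2 : ys.length + 1 ≤ n + 1 := by simpa using hn
        omega
      by_cases hx : (String.ofList [x] == c) = true
      · rw [seg_cons_pos c t x ys hx] at hb
        rcases List.mem_append.mp hb with h | h
        · have := intRange_mem _ _ _ h; omega
        · exact ih _ hdrop _ (by positivity) b h
      · rw [seg_cons_neg c t x ys (by simpa using hx)] at hb
        exact ih _ hdrop 0 le_rfl b hb

lemma runsB_pos (c : String) : ∀ (n : Nat) (xs : List Char), xs.length ≤ n →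
    ∀ b ∈ runsB c xs, 1 ≤ b := by
  intro n
  induction n with
  | zero =>
    intro xs hn b hb
    have : xs = [] := List.length_eq_zero_iff.mp (Nat.le_zero.mp hn)
    subst this; simp [runsB_nil] at hb
  | succ n ih =>
    intro xs hn b hb
    rcases xs with _ | ⟨x, ys⟩
    · simp [runsB_nil] at hb
    · have hdrop : (ys.dropWhile (· == x)).length ≤ n := by
        have h1 := List.length_dropWhile_le (· == x) ys
        have h2 : ys.length + 1 ≤ n + 1 := by simpa using hn
        omega
      by_cases hx : (String.ofList [x] == c) = true
      · rw [runsB_cons_pos c x ys hx] at hb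
        rcases List.mem_cons.mp hb with h | h
        · subst h; omega
        · exact ih _ hdrop b h
      · rw [runsB_cons_neg c x ys (by simpa using hx)] at hb
        exact ih _ hdrop b hb

lemma seg_reset (c : String) (x : Char) (xs : List Char) (t t' : Int)
    (hx : (String.ofList [x] == c) = false) : seg c t (x :: xs) = seg c t' (x :: xs) := by
  rw [seg_cons_neg c t x xs hx, seg_cons_neg c t' x xs hx]

-- the max of the values A appends equals the max of the run lengths B records
lemma seg_runs_max (c : String) : ∀ (n : Nat) (xs : List Char), xs.length ≤ n →
    (seg c 0 xs).foldl max 0 = (runsB c xs).foldl max 0 := by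
  intro n
  induction n with
  | zero =>
    intro xs hn
    have : xs = [] := List.length_eq_zero_iff.mp (Nat.le_zero.mp hn)
    subst this; rw [seg_nil, runsB_nil]
  | succ n ih =>
    intro xs hn
    rcases xs with _ | ⟨x, ys⟩
    · rw [seg_nil, runsB_nil]
    · have hlen : ys.length + 1 ≤ n + 1 := by simpa using hn
      have hdrop : (ys.dropWhile (· == x)).length ≤ n := by
        have h1 := List.length_dropWhile_le (· == x) ys
        omega
      by_cases hx : (String.ofList [x] == c) = true
      · -- the rest starts with a different character, which cannot also match c
        have hreset : seg c ((0:Int) + (((ys.takeWhile (· == x)).length + 1 : Nat) : Int))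
              (ys.dropWhile (· == x)) = seg c 0 (ys.dropWhile (· == x)) := by
          rcases hdw : ys.dropWhile (· == x) with _ | ⟨y, zs⟩
          · rw [seg_nil, seg_nil]
          · have hyx : (y == x) = false := dropWhile_cons_prop (fun z => z == x) ys hdw
            have hyc : (String.ofList [y] == c) = false := by
              cases hh : (String.ofList [y] == c) with
              | false => rfl
              | true =>
                exfalso
                have e1 := beq_iff_eq.mp hh
                have e2 := beq_iff_eq.mp hx
                have : y = x := ofList_one_inj (e1.trans e2.symm)
                subst this; simp at hyx
            exact seg_reset c y zs _ _ hyc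
        have hsegpos := fun b hb => seg_pos c n (ys.dropWhile (· == x)) hdrop 0 le_rfl b hb
        have hrunpos := fun b hb => runsB_pos c n (ys.dropWhile (· == x)) hdrop b hb
        rw [seg_cons_pos c 0 x ys hx, runsB_cons_pos c x ys hx, hreset,
            List.foldl_append, intRange_fold _ 0, List.foldl_cons]
        have e1 : (0:Int) + (((ys.takeWhile (· == x)).length + 1 : Nat) : Int)
            = ((ys.takeWhile (· == x)).length : Int) + 1 := by push_cast; ring
        have e2 : max (0:Int) (1 + ((ys.takeWhile (· == x)).length : Int))
            = ((ys.takeWhile (· == x)).length : Int) + 1 := by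
          have : (0:Int) ≤ ((ys.takeWhile (· == x)).length : Int) := by positivity
          omega
        rw [e1, e2]
        have hK : (0:Int) ≤ ((ys.takeWhile (· == x)).length : Int) + 1 := by positivity
        rw [foldl_max_pull _ _ hK (fun b hb => le_trans (by norm_num) (hsegpos b hb)),
            foldl_max_pull _ _ hK (fun b hb => le_trans (by norm_num) (hrunpos b hb)),
            ih _ hdrop]
      · rw [seg_cons_neg c 0 x ys (by simpa using hx),
            runsB_cons_neg c x ys (by simpa using hx)]
        exact ih _ hdrop

lemma maxgd (xs : List Int) (h : ∀ x ∈ xs, 0 ≤ x) :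
    (PySem.List.max? xs (fun y => y)).getD 0 = xs.foldl max 0 := by
  rcases xs with _ | ⟨x, t⟩
  · rfl
  · rw [PySem.List.max?_id_cons, Option.getD_some, List.foldl_cons]
    have hx : max (0:Int) x = x := max_eq_right (h x (by simp))
    rw [hx]

-- ===== VERDICT (by name: the statement is the Claim_ definition above) =====
theorem f_spec : Claim_equal_f := by
  intro s c _ _
  unfold Spec_f f f_alt
  have hfold := fold_eq c s.toList.length s.toList le_rfl 0 []
  rw [hfold]
  simp only [List.nil_append]
  have hsegpos := fun b hb => seg_pos c s.toList.length s.toList le_rfl 0 le_rfl b hb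
  have hrunpos := fun b hb => runsB_pos c s.toList.length s.toList le_rfl b hb
  rw [maxgd _ (fun b hb => le_trans (by norm_num) (hsegpos b hb)),
      maxgd _ (fun b hb => le_trans (by norm_num) (hrunpos b hb))]
  exact seg_runs_max c s.toList.length s.toList le_rfl
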